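-- pv_equiv track=rewrite | github.com/zw0583228508/Muzikal | artifacts/music-ai-backend/tests/eval/metrics.py | _parse_chord
-- ===== SOURCE A (Python) =====
-- from typing import Dict, List, Optional, Tuple
--
-- _NOTE_NAMES = ["C", "C#", "D", "D#", "E", "F", "F#", "G", "G#", "A", "A#", "B"]
--
-- _ENHARMONIC = {
--     "Db": "C#", "Eb": "D#", "Fb": "E", "Gb": "F#",
--     "Ab": "G#", "Bb": "A#", "Cb": "B", "E#": "F", "B#": "C",
-- }
--
-- _QUALITY_ALIASES = {
--     "": "maj", "M": "maj", "major": "maj",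
--     "m": "min", "minor": "min",
--     "7": "dom7", "maj7": "maj7", "min7": "min7",
--     "dim": "dim", "aug": "aug", "o": "dim", "+": "aug",
--     "sus": "sus4", "sus2": "sus2", "sus4": "sus4",
-- }
--
-- def _parse_chord(chord_str: str) -> Tuple[Optional[str], Optional[str]]:
--     """Parse 'C#min7' → ('C#', 'min7'), or ('N', None) for N.C."""
--     if chord_str in ("N", "N.C.", "NC", "None", "no_chord"):
--         return "N", None
--
--     for root_len in (2, 1):
--         root = chord_str[:root_len]
--         root = _ENHARMONIC.get(root, root)
--         if root in _NOTE_NAMES: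
--             quality_raw = chord_str[root_len:].strip(":")
--             quality = _QUALITY_ALIASES.get(quality_raw, quality_raw)
--             if not quality:
--                 quality = "maj"
--             return root, quality
--
--     return None, None
-- ===== SOURCE B (Python) =====
-- _NOTE_NAMES = ["C", "C#", "D", "D#", "E", "F", "F#", "G", "G#", "A", "A#", "B"]
--
-- _QUALITY_ALIASES = {
--     "": "maj", "M": "maj", "major": "maj",
--     "m": "min", "minor": "min",
--     "7": "dom7", "maj7": "maj7", "min7": "min7",
--     "dim": "dim", "aug": "aug", "o": "dim", "+": "aug",
--     "sus": "sus4", "sus2": "sus2", "sus4": "sus4",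
-- }
--
-- _LETTER_PC = {"C": 0, "D": 2, "E": 4, "F": 5, "G": 7, "A": 9, "B": 11}
--
-- def _parse_chord(chord_str):
--     """Pitch-class arithmetic: letter -> semitone, '#'/'b' shift +-1, index _NOTE_NAMES."""
--     if chord_str in ("N", "N.C.", "NC", "None", "no_chord"):
--         return "N", None
--     if not chord_str or chord_str[0] not in _LETTER_PC:
--         return None, None
--     pc = _LETTER_PC[chord_str[0]]
--     n = 1
--     if len(chord_str) > 1 and chord_str[1] == '#':
--         pc += 1
--         n = 2
--     elif len(chord_str) > 1 and chord_str[1] == 'b':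
--         pc -= 1
--         n = 2
--     root = _NOTE_NAMES[pc % 12]
--     quality = chord_str[n:].strip(':')
--     quality = _QUALITY_ALIASES.get(quality, quality)
--     return root, quality or "maj"
-- ===== Notes on version B (the rewrite author's own statement) =====
-- stated objective: alternative
-- what changed: A tries root lengths 2 then 1, rewriting each candidate through the _ENHARMONIC dict and validating against _NOTE_NAMES; B computes the root by pitch-class arithmetic (letter -> semitone, '#'/'b' shift +-1, index _NOTE_NAMES[pc % 12]) with no enharmonic table and no trial loop.
import Mathlib
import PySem

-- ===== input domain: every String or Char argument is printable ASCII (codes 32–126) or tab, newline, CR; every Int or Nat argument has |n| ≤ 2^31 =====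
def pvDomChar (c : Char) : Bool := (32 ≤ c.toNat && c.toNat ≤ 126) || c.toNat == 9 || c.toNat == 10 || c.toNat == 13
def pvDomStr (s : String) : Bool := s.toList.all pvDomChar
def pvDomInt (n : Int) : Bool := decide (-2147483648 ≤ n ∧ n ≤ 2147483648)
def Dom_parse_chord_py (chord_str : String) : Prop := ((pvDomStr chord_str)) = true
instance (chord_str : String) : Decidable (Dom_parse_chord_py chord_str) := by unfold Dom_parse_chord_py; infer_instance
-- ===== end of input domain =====

-- B replaces A's enharmonic-dict trial loop (root lengths 2 then 1) by pitch-class arithmetic: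
-- letter -> semitone, '#'/'b' shift ±1, root = _NOTE_NAMES[pc % 12]; objective: alternative (same cost).
-- String contents are handled at the List Char level, per the PySem convention.

def pvNoteNames : List (List Char) :=
  [['C'], ['C','#'], ['D'], ['D','#'], ['E'], ['F'], ['F','#'], ['G'], ['G','#'], ['A'], ['A','#'], ['B']]

def pvQualityAliases : PySem.Dict (List Char) (List Char) := PySem.Dict.ofList
  [([], ['m','a','j']), (['M'], ['m','a','j']), (['m','a','j','o','r'], ['m','a','j']),
   (['m'], ['m','i','n']), (['m','i','n','o','r'], ['m','i','n']),
   (['7'], ['d','o','m','7']), (['m','a','j','7'], ['m','a','j','7']), (['m','i','n','7'], ['m','i','n','7']),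
   (['d','i','m'], ['d','i','m']), (['a','u','g'], ['a','u','g']), (['o'], ['d','i','m']), (['+'], ['a','u','g']),
   (['s','u','s'], ['s','u','s','4']), (['s','u','s','2'], ['s','u','s','2']), (['s','u','s','4'], ['s','u','s','4'])]

-- the no-chord guard, the same literal tuple test in both Python sources
def pvNoChord (chord_str : String) : Bool :=
  chord_str == "N" || chord_str == "N.C." || chord_str == "NC" || chord_str == "None" || chord_str == "no_chord"

-- ===== PORT A =====
def pvEnharmonic : PySem.Dict (List Char) (List Char) := PySem.Dict.ofList
  [(['D','b'], ['C','#']), (['E','b'], ['D','#']), (['F','b'], ['E']), (['G','b'], ['F','#']),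
   (['A','b'], ['G','#']), (['B','b'], ['A','#']), (['C','b'], ['B']), (['E','#'], ['F']), (['B','#'], ['C'])]

-- A's body after the guard: 'for root_len in (2, 1): …' with an early return; the loop becomes
-- structural recursion over the literal list [2, 1].
def pvATry (cs : List Char) : List Nat → Option String × Option String
  | [] => (none, none)
  | rootLen :: rest =>
      let root0 := PySem.List.slice cs none (some (rootLen : Int))     -- chord_str[:root_len]
      let root := pvEnharmonic.getD root0 root0                        -- _ENHARMONIC.get(root, root)
      if root ∈ pvNoteNames then
        let qualityRaw := PySem.Chars.stripChars (PySem.List.slice cs (some (rootLen : Int)) none) [':']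
        let quality := pvQualityAliases.getD qualityRaw qualityRaw
        (some (String.ofList root), some (String.ofList (if quality = [] then ['m','a','j'] else quality)))
      else pvATry cs rest

def parse_chord_py (chord_str : String) : Option String × Option String :=
  if pvNoChord chord_str then (some "N", none)
  else pvATry chord_str.toList [2, 1]

-- ===== PORT B =====
def pvLetterPC : PySem.Dict Char Int := PySem.Dict.ofList
  [('C', 0), ('D', 2), ('E', 4), ('F', 5), ('G', 7), ('A', 9), ('B', 11)]

def parse_chord_py_alt (chord_str : String) : Option String × Option String :=
  if pvNoChord chord_str then (some "N", none)
  else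
    match chord_str.toList with
    | [] => (none, none)
    | c :: rest =>
      match pvLetterPC.get? c with
      | none => (none, none)
      | some pc0 =>
        let pcn : Int × Nat :=
          match rest with
          | '#' :: _ => (pc0 + 1, 2)
          | 'b' :: _ => (pc0 - 1, 2)
          | _ => (pc0, 1)
        -- _NOTE_NAMES[pc % 12]: index always in range (0 ≤ pc % 12 < 12), so pyGet? never misses
        let root := (PySem.List.pyGet? pvNoteNames (PySem.Int.mod pcn.1 12)).getD []
        let qualityRaw := PySem.Chars.stripChars ((c :: rest).drop pcn.2) [':']
        let quality := pvQualityAliases.getD qualityRaw qualityRaw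
        (some (String.ofList root), some (String.ofList (if quality = [] then ['m','a','j'] else quality)))

-- ===== PRECONDITION & SPEC =====
def Spec_parse_chord_py (chord_str : String) (out : Option String × Option String) : Prop := out = parse_chord_py_alt chord_str
instance (chord_str : String) (out : Option String × Option String) : Decidable (Spec_parse_chord_py chord_str out) := by unfold Spec_parse_chord_py; infer_instance

-- ===== CLAIM =====
def Claim_equal_parse_chord_py : Prop := ∀ (chord_str : String), Dom_parse_chord_py chord_str → Spec_parse_chord_py chord_str (parse_chord_py chord_str)

-- ===== LEMMAS AND PROOFS =====

theorem pvEnh_eq : pvEnharmonic = PySem.Dict.mk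
  [(['D','b'], ['C','#']), (['E','b'], ['D','#']), (['F','b'], ['E']), (['G','b'], ['F','#']),
   (['A','b'], ['G','#']), (['B','b'], ['A','#']), (['C','b'], ['B']), (['E','#'], ['F']), (['B','#'], ['C'])] := by decide

theorem pvQual_eq : pvQualityAliases = PySem.Dict.mk
  [([], ['m','a','j']), (['M'], ['m','a','j']), (['m','a','j','o','r'], ['m','a','j']),
   (['m'], ['m','i','n']), (['m','i','n','o','r'], ['m','i','n']),
   (['7'], ['d','o','m','7']), (['m','a','j','7'], ['m','a','j','7']), (['m','i','n','7'], ['m','i','n','7']),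
   (['d','i','m'], ['d','i','m']), (['a','u','g'], ['a','u','g']), (['o'], ['d','i','m']), (['+'], ['a','u','g']),
   (['s','u','s'], ['s','u','s','4']), (['s','u','s','2'], ['s','u','s','2']), (['s','u','s','4'], ['s','u','s','4'])] := by decide

theorem pvLPC_eq : pvLetterPC = PySem.Dict.mk
  [('C', 0), ('D', 2), ('E', 4), ('F', 5), ('G', 7), ('A', 9), ('B', 11)] := by decide

theorem pvKey (cs : List Char) : pvATry cs [2, 1] =
    (match cs with
    | [] => (none, none)
    | c :: rest =>
      match pvLetterPC.get? c with
      | none => (none, none)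
      | some pc0 =>
        let pcn : Int × Nat :=
          match rest with
          | '#' :: _ => (pc0 + 1, 2)
          | 'b' :: _ => (pc0 - 1, 2)
          | _ => (pc0, 1)
        let root := (PySem.List.pyGet? pvNoteNames (PySem.Int.mod pcn.1 12)).getD []
        let qualityRaw := PySem.Chars.stripChars ((c :: rest).drop pcn.2) [':']
        let quality := pvQualityAliases.getD qualityRaw qualityRaw
        (some (String.ofList root), some (String.ofList (if quality = [] then ['m','a','j'] else quality)))
      : Option String × Option String) := by
  have slice2 : ∀ l : List Char, PySem.List.slice l none (some 2) = l.take 2 := fun l => by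
    rw [PySem.List.slice_to _ (by norm_num)]; rfl
  have slice1 : ∀ l : List Char, PySem.List.slice l none (some 1) = l.take 1 := fun l => by
    rw [PySem.List.slice_to _ (by norm_num)]; rfl
  have sliceF2 : ∀ l : List Char, PySem.List.slice l (some 2) none = l.drop 2 := fun l => by
    rw [PySem.List.slice_from _ (by norm_num)]; rfl
  have sliceF1 : ∀ l : List Char, PySem.List.slice l (some 1) none = l.drop 1 := fun l => by
    rw [PySem.List.slice_from _ (by norm_num)]; rfl
  match cs with
  | [] => decide
  | c :: rest =>
    by_cases hc : c ∈ ['A', 'B', 'C', 'D', 'E', 'F', 'G']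
    · simp only [List.mem_cons, List.not_mem_nil, or_false] at hc
      match rest with
      | [] =>
        rcases hc with rfl | rfl | rfl | rfl | rfl | rfl | rfl <;> decide
      | c2 :: rest' =>
        by_cases h2 : c2 = '#' ∨ c2 = 'b'
        · rcases hc with rfl | rfl | rfl | rfl | rfl | rfl | rfl <;>
            rcases h2 with rfl | rfl <;>
            simp [pvATry, slice2, sliceF2, pvEnh_eq, pvQual_eq, pvLPC_eq, pvNoteNames,
              PySem.Dict.getD_eq_get?_getD, PySem.Dict.get?, PySem.List.pyGet?, PySem.List.pyIdx?,
              PySem.Int.mod]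
        · simp only [not_or] at h2
          obtain ⟨hs, hb⟩ := h2
          rcases hc with rfl | rfl | rfl | rfl | rfl | rfl | rfl <;>
            simp [pvATry, slice2, slice1, sliceF1, pvEnh_eq, pvQual_eq, pvLPC_eq, pvNoteNames,
              PySem.Dict.getD_eq_get?_getD, PySem.Dict.get?, PySem.List.pyGet?, PySem.List.pyIdx?,
              PySem.Int.mod, Ne.symm hs, Ne.symm hb, hs, hb]
    · simp only [List.mem_cons, List.not_mem_nil, or_false, not_or] at hc
      obtain ⟨hA, hB, hC, hD, hE, hF, hG⟩ := hc
      match rest with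
      | [] =>
        simp [pvATry, slice2, slice1, pvEnh_eq, pvLPC_eq, pvNoteNames,
          PySem.Dict.getD_eq_get?_getD, PySem.Dict.get?, List.find?,
          beq_eq_false_iff_ne.mpr (Ne.symm hA), beq_eq_false_iff_ne.mpr (Ne.symm hB),
          beq_eq_false_iff_ne.mpr (Ne.symm hC), beq_eq_false_iff_ne.mpr (Ne.symm hD),
          beq_eq_false_iff_ne.mpr (Ne.symm hE), beq_eq_false_iff_ne.mpr (Ne.symm hF),
          beq_eq_false_iff_ne.mpr (Ne.symm hG),
          hA, hB, hC, hD, hE, hF, hG]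
      | c2 :: rest' =>
        simp [pvATry, slice2, slice1, pvEnh_eq, pvLPC_eq, pvNoteNames,
          PySem.Dict.getD_eq_get?_getD, PySem.Dict.get?, List.find?,
          beq_eq_false_iff_ne.mpr (Ne.symm hA), beq_eq_false_iff_ne.mpr (Ne.symm hB),
          beq_eq_false_iff_ne.mpr (Ne.symm hC), beq_eq_false_iff_ne.mpr (Ne.symm hD),
          beq_eq_false_iff_ne.mpr (Ne.symm hE), beq_eq_false_iff_ne.mpr (Ne.symm hF),
          beq_eq_false_iff_ne.mpr (Ne.symm hG),
          hA, hB, hC, hD, hE, hF, hG]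

-- ===== VERDICT =====
theorem parse_chord_py_spec : Claim_equal_parse_chord_py := by
  intro s _
  unfold Spec_parse_chord_py parse_chord_py parse_chord_py_alt
  by_cases h : pvNoChord s <;> simp [h, pvKey]
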